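-- pv_equiv track=rewrite | github.com/richnguyenn/Advent-of-Code | 2023/Day 1/p2.py | calibrationVal
-- ===== SOURCE A (Python) =====
-- def calibrationVal(s: str) -> int:
--     nums = []
--     for i, char in enumerate(s):
--         if char.isdigit():
--             nums.append(char)
--         for d, val in enumerate(['one', 'two', 'three', 'four', 'five', 'six', 'seven', 'eight', 'nine']):
--             if s[i:].startswith(val):
--                 nums.append(str(d + 1))
--     if len(nums) == 0:
--         return 0
--     elif len(nums) == 1:
--         return int(nums[0] * 2)
--     else:
--         val = nums[0] + nums[-1]
--         return int(val)
-- ===== SOURCE B (Python) =====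
-- WORDS = ['one', 'two', 'three', 'four', 'five', 'six', 'seven', 'eight', 'nine']
--
--
-- def calibrationVal(s: str) -> int:
--     def match_at(i):
--         if s[i].isdigit():
--             return int(s[i])
--         for d, w in enumerate(WORDS):
--             if s.startswith(w, i):
--                 return d + 1
--         return None
--
--     n = len(s)
--     first = next((m for m in map(match_at, range(n)) if m is not None), None)
--     if first is None:
--         return 0
--     last = next(m for m in map(match_at, reversed(range(n))) if m is not None)
--     return first * 10 + last
-- ===== Notes on version B (the rewrite author's own statement) =====
-- stated objective: simpler
-- what changed: Instead of collecting every digit/spelled-word match of the whole string into a list and reading its first and last element, B does two break-on-first-hit scans (forward for the first match, backward for the last) and combines them arithmetically as first*10+last.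
import Mathlib
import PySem

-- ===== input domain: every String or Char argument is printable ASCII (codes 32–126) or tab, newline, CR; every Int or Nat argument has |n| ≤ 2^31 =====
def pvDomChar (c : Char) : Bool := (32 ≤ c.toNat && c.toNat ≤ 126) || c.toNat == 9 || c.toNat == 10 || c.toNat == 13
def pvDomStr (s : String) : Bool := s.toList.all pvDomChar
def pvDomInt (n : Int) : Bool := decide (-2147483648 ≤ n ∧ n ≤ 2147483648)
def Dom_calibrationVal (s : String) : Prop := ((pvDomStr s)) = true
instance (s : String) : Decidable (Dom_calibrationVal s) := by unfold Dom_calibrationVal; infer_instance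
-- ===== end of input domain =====

-- B replaces A's full pass collecting every digit/word match in a list by two
-- break-on-first-hit scans (forward for the first match, backward for the last).

-- the nine spelled-out digit words, shared verbatim by both Pythons
def pvWords : List (List Char) :=
  [['o','n','e'], ['t','w','o'], ['t','h','r','e','e'], ['f','o','u','r'], ['f','i','v','e'],
   ['s','i','x'], ['s','e','v','e','n'], ['e','i','g','h','t'], ['n','i','n','e']]

-- ===== PORT A =====
-- str(d + 1) for 0 ≤ d ≤ 8 is the single digit character; exact here
def pvDigitChar (n : Nat) : Char := Char.ofNat (48 + n)

def calibrationVal (s : String) : Int :=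
  let cs := s.toList
  let nums : List Char :=
    (PySem.List.enumerate cs).foldl (fun nums ic =>
      (PySem.List.enumerate pvWords).foldl (fun nums dw =>
        -- s[i:].startswith(val); i ≥ 0 comes from enumerate
        if PySem.Chars.startswith (PySem.List.slice cs (some ic.1) none) dw.2
        then nums ++ [pvDigitChar (dw.1 + 1).toNat] else nums)
        (if PySem.Chars.isdigit ic.2 then nums ++ [ic.2] else nums)) []
  match nums with
  | [] => 0
  | [c] => (PySem.Int.ofChars? [c, c]).getD 0          -- int(nums[0] * 2); never none here
  | c :: d :: t => (PySem.Int.ofChars? [c, (d :: t).getLast (by simp)]).getD 0  -- int(nums[0] + nums[-1])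

-- ===== PORT B =====
-- match_at(i): the digit value starting at index i, if any (digit char, else one of the nine words)
def pvMatchAt (cs : List Char) (i : Nat) : Option Int :=
  match cs[i]? with
  | none => none
  | some c =>
    if PySem.Chars.isdigit c then some ((PySem.Int.ofChars? [c]).getD 0)   -- int(s[i]); never none here
    else (PySem.List.enumerate pvWords).findSome? (fun dw =>
      -- s.startswith(w, i) with 0 ≤ i ≤ len(s) is: w is a prefix of s[i:]
      if PySem.Chars.startswith (PySem.List.slice cs (some (i : Int)) none) dw.2
      then some (dw.1 + 1) else none)

def calibrationVal_alt (s : String) : Int :=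
  let cs := s.toList
  match (List.range cs.length).findSome? (pvMatchAt cs) with
  | none => 0
  | some first =>
    -- the backward scan; its `next` cannot fail once `first` exists, so the default is never used
    first * 10 + (((List.range cs.length).reverse.findSome? (pvMatchAt cs)).getD 0)

-- ===== PRECONDITION & SPEC =====
def Spec_calibrationVal (s : String) (out : Int) : Prop := out = calibrationVal_alt s
instance (s : String) (out : Int) : Decidable (Spec_calibrationVal s out) := by unfold Spec_calibrationVal; infer_instance

-- ===== CLAIM (what is proved, stated in full; the proofs are below) =====
def Claim_equal_calibrationVal : Prop := ∀ (s : String), Dom_calibrationVal s → Spec_calibrationVal s (calibrationVal s)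

-- ===== LEMMAS AND PROOFS =====

theorem digit_cases (c : Char) (h : PySem.Chars.isdigit c = true) :
    c ∈ ['0','1','2','3','4','5','6','7','8','9'] := by
  simp only [PySem.Chars.isdigit, Bool.and_eq_true, decide_eq_true_eq, Char.le_def] at h
  have h1 : 48 ≤ c.toNat := h.1
  have h2 : c.toNat ≤ 57 := h.2
  rw [show c = Char.ofNat c.toNat from (Char.ofNat_toNat c).symm]
  generalize c.toNat = n at h1 h2 ⊢
  interval_cases n <;> decide

-- generic: a find-first-match loop is the head of the filtered list
theorem findSome?_if {α β : Type} (l : List α) (p : α → Bool) (g : α → β) :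
    l.findSome? (fun x => if p x then some (g x) else none)
      = (l.filter p).head?.map g := by
  induction l with
  | nil => rfl
  | cons x t ih =>
    by_cases hx : p x <;> simp [hx, ih]

-- the value A appends at a word match, as an Option
def wordMatch (t : List Char) : Option Char :=
  ((PySem.List.enumerate pvWords).filter
      (fun dw => PySem.Chars.startswith t dw.2)).head?.map
    (fun dw => pvDigitChar (dw.1 + 1).toNat)

-- no two of the nine words can start at the same position
theorem words_unique (t : List Char) (dw dw' : Int × List Char)
    (h : dw ∈ PySem.List.enumerate pvWords) (h' : dw' ∈ PySem.List.enumerate pvWords)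
    (p : PySem.Chars.startswith t dw.2 = true) (p' : PySem.Chars.startswith t dw'.2 = true) :
    dw = dw' := by
  rw [PySem.Chars.startswith_iff] at p p'
  have hcomp := List.prefix_or_prefix_of_prefix p p'
  have key : ∀ a ∈ PySem.List.enumerate pvWords, ∀ b ∈ PySem.List.enumerate pvWords,
      a.2 <+: b.2 → a = b := by decide
  rcases hcomp with hc | hc
  · exact key dw h dw' h' hc
  · exact (key dw' h' dw h hc).symm

-- A's inner loop over the nine words appends exactly the (at most one) match
theorem inner_eq (t : List Char) (acc : List Char) :
    (PySem.List.enumerate pvWords).foldl (fun nums dw =>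
        if PySem.Chars.startswith t dw.2
        then nums ++ [pvDigitChar (dw.1 + 1).toNat] else nums) acc
      = acc ++ (wordMatch t).toList := by
  rw [PySem.List.foldl_append_if]
  unfold wordMatch
  cases hf : (PySem.List.enumerate pvWords).filter (fun dw => PySem.Chars.startswith t dw.2) with
  | nil => simp
  | cons x xs =>
    have hxf : x ∈ (PySem.List.enumerate pvWords).filter (fun dw => PySem.Chars.startswith t dw.2) := by
      rw [hf]; exact List.mem_cons_self
    have hx := List.mem_filter.mp hxf
    have hnd : (x :: xs).Nodup := by
      rw [← hf]; exact List.Nodup.filter _ (by decide)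
    have hxs : xs = [] := by
      rw [List.eq_nil_iff_forall_not_mem]
      intro y hy
      have hyf : y ∈ (PySem.List.enumerate pvWords).filter (fun dw => PySem.Chars.startswith t dw.2) := by
        rw [hf]; exact List.mem_cons_of_mem _ hy
      have hym := List.mem_filter.mp hyf
      have : y = x := words_unique t y x hym.1 hx.1 hym.2 hx.2
      exact (List.nodup_cons.mp hnd).1 (this ▸ hy)
    subst hxs; simp

-- a digit character is never the start of one of the nine words
theorem no_word_at_digit (c : Char) (r : List Char) (h : PySem.Chars.isdigit c = true) :
    ∀ dw ∈ PySem.List.enumerate pvWords, ¬ PySem.Chars.startswith (c :: r) dw.2 = true := by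
  have hc := digit_cases c h
  intro dw hm hsw
  rw [PySem.Chars.startswith_iff] at hsw
  fin_cases hm <;> rw [List.cons_prefix_cons] at hsw <;> fin_cases hc <;> simp_all

theorem digit_char_roundtrip (c : Char) (h : PySem.Chars.isdigit c = true) :
    pvDigitChar ((PySem.Int.ofChars? [c]).getD 0).toNat = c := by
  have hc := digit_cases c h
  fin_cases hc <;> decide

theorem drop_eq_cons (cs : List Char) (i : Nat) (c : Char) (hc : cs[i]? = some c) :
    cs.drop i = c :: cs.drop (i + 1) := by
  have hi : i < cs.length := (List.getElem?_eq_some_iff.mp hc).1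
  have hgi : cs[i] = c := (List.getElem?_eq_some_iff.mp hc).2
  rw [← hgi]; exact (List.getElem_cons_drop hi).symm

theorem pvMatchAt_some (cs : List Char) (i : Nat) (c : Char) (hc : cs[i]? = some c) :
    pvMatchAt cs i =
      (if PySem.Chars.isdigit c then some ((PySem.Int.ofChars? [c]).getD 0)
       else (PySem.List.enumerate pvWords).findSome? (fun dw =>
        if PySem.Chars.startswith (PySem.List.slice cs (some (i : Int)) none) dw.2
        then some (dw.1 + 1) else none)) := by
  unfold pvMatchAt; rw [hc]

-- what A appends while scanning index i: exactly B's match there, rendered as a digit char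
def contrib (cs : List Char) (i : Nat) : List Char :=
  ((pvMatchAt cs i).map (fun v => pvDigitChar v.toNat)).toList

theorem step_contrib (cs : List Char) (i : Nat) (c : Char) (hc : cs[i]? = some c)
    (acc : List Char) :
    (PySem.List.enumerate pvWords).foldl (fun nums dw =>
        if PySem.Chars.startswith (PySem.List.slice cs (some (i : Int)) none) dw.2
        then nums ++ [pvDigitChar (dw.1 + 1).toNat] else nums)
      (if PySem.Chars.isdigit c then acc ++ [c] else acc)
      = acc ++ contrib cs i := by
  have hdrop : PySem.List.slice cs (some (i : Int)) none = c :: cs.drop (i + 1) := by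
    rw [PySem.List.slice_from_natCast]; exact drop_eq_cons cs i c hc
  rw [inner_eq]
  unfold contrib
  rw [pvMatchAt_some cs i c hc]
  by_cases hd : PySem.Chars.isdigit c = true
  · have hwm : wordMatch (PySem.List.slice cs (some (i : Int)) none) = none := by
      unfold wordMatch
      rw [List.filter_eq_nil_iff.mpr (by
        intro dw hdw
        rw [hdrop]
        simpa using no_word_at_digit c (cs.drop (i + 1)) hd dw hdw)]
      rfl
    simp only [hwm, if_pos hd]
    simp [digit_char_roundtrip c hd]
  · rw [if_neg hd, if_neg hd]
    rw [findSome?_if]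
    unfold wordMatch
    simp [Option.map_map, Function.comp_def]

-- the enumerate loop as a map over range
theorem enum_eq_map_range (cs : List Char) (z : Int) :
    PySem.List.enumerate cs z
      = (List.range cs.length).map (fun (k : Nat) => (z + (k : Int), cs.getD k ' ')) := by
  induction cs generalizing z with
  | nil => simp [PySem.List.enumerate_nil]
  | cons c t ih =>
    rw [PySem.List.enumerate_cons, ih (z + 1)]
    simp only [List.length_cons, List.range_succ_eq_map, List.map_cons, List.map_map]
    congr 1
    · simp
    · apply List.map_congr_left
      intro k _
      simp only [Function.comp_def, Nat.succ_eq_add_one, Prod.mk.injEq, List.getD_cons_succ,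
        and_true]
      push_cast; ring

-- A's collected list `nums` is B's match list, rendered as digit chars
theorem nums_eq (cs : List Char) :
    (PySem.List.enumerate cs).foldl (fun nums ic =>
      (PySem.List.enumerate pvWords).foldl (fun nums dw =>
        if PySem.Chars.startswith (PySem.List.slice cs (some ic.1) none) dw.2
        then nums ++ [pvDigitChar (dw.1 + 1).toNat] else nums)
        (if PySem.Chars.isdigit ic.2 then nums ++ [ic.2] else nums)) []
      = ((List.range cs.length).filterMap (pvMatchAt cs)).map (fun v => pvDigitChar v.toNat) := by
  have he : PySem.List.enumerate cs 0
      = (List.range cs.length).map (fun k => (((k : Nat) : Int), cs.getD k ' ')) := by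
    have h := enum_eq_map_range cs 0
    simpa using h
  have hmem : ∀ ic ∈ PySem.List.enumerate cs 0,
      ic.1 = ((ic.1.toNat : Nat) : Int) ∧ cs[ic.1.toNat]? = some ic.2 := by
    intro ic hm
    rw [he] at hm
    obtain ⟨k, hk, rfl⟩ := List.mem_map.mp hm
    have hk' : k < cs.length := List.mem_range.mp hk
    refine ⟨by simp, ?_⟩
    simp only [Int.toNat_natCast]
    rw [List.getD_eq_getElem cs ' ' hk']
    exact List.getElem?_eq_getElem hk'
  have hcong : ∀ (nums : List Char) (ic : Int × Char), ic ∈ PySem.List.enumerate cs 0 →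
      (PySem.List.enumerate pvWords).foldl (fun nums dw =>
        if PySem.Chars.startswith (PySem.List.slice cs (some ic.1) none) dw.2
        then nums ++ [pvDigitChar (dw.1 + 1).toNat] else nums)
        (if PySem.Chars.isdigit ic.2 then nums ++ [ic.2] else nums)
      = nums ++ contrib cs ic.1.toNat := by
    intro nums ic hm
    obtain ⟨h1, h2⟩ := hmem ic hm
    rw [h1]
    simp only [Int.toNat_natCast]
    exact step_contrib cs ic.1.toNat ic.2 h2 nums
  rw [PySem.List.foldl_congr_mem _ _ _ _ hcong]
  rw [PySem.List.foldl_append_eq_flatMap]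
  have hflat : (PySem.List.enumerate cs 0).flatMap (fun ic => contrib cs ic.1.toNat)
      = (List.range cs.length).flatMap (fun k => contrib cs k) := by
    rw [he, List.flatMap_map]
    simp
  rw [hflat]
  rw [List.map_filterMap, List.filterMap_eq_flatMap_toList]
  rfl

theorem matchAt_bounds (cs : List Char) (i : Nat) (v : Int)
    (h : pvMatchAt cs i = some v) : 0 ≤ v ∧ v ≤ 9 := by
  cases hc : cs[i]? with
  | none => unfold pvMatchAt at h; rw [hc] at h; exact absurd h (by simp)
  | some c =>
    rw [pvMatchAt_some cs i c hc] at h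
    by_cases hd : PySem.Chars.isdigit c = true
    · rw [if_pos hd] at h
      have hmem := digit_cases c hd
      have hv : v = (PySem.Int.ofChars? [c]).getD 0 := (Option.some.inj h).symm
      subst hv
      fin_cases hmem <;> (constructor <;> decide)
    · rw [if_neg hd] at h
      obtain ⟨dw, hdw, hsome⟩ := List.exists_of_findSome?_eq_some h
      have hall : ∀ a ∈ PySem.List.enumerate pvWords, 0 ≤ a.1 + 1 ∧ a.1 + 1 ≤ 9 := by decide
      split at hsome
      · have hv : v = dw.1 + 1 := (Option.some.inj hsome).symm
        subst hv
        exact hall dw hdw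
      · exact absurd hsome (by simp)

theorem ofChars?_two_digits (a b : Int) (ha0 : 0 ≤ a) (ha9 : a ≤ 9) (hb0 : 0 ≤ b) (hb9 : b ≤ 9) :
    PySem.Int.ofChars? [pvDigitChar a.toNat, pvDigitChar b.toNat] = some (10 * a + b) := by
  lift a to Nat using ha0 with m
  lift b to Nat using hb0 with k
  have hm : m ≤ 9 := by exact_mod_cast ha9
  have hk : k ≤ 9 := by exact_mod_cast hb9
  simp only [Int.toNat_natCast]
  interval_cases m <;> interval_cases k <;> decide

-- ===== VERDICT (by name: the statement is the Claim_ definition above) =====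
theorem calibrationVal_spec : Claim_equal_calibrationVal := by
  intro s _
  unfold Spec_calibrationVal
  show calibrationVal s = calibrationVal_alt s
  simp only [calibrationVal, calibrationVal_alt]
  rw [nums_eq s.toList]
  set cs := s.toList with hcs
  set L := (List.range cs.length).filterMap (pvMatchAt cs) with hL
  have hbounds : ∀ v ∈ L, 0 ≤ v ∧ v ≤ 9 := by
    intro v hv
    obtain ⟨i, _, hi⟩ := List.mem_filterMap.mp hv
    exact matchAt_bounds cs i v hi
  have hfirst : (List.range cs.length).findSome? (pvMatchAt cs) = L.head? := by
    rw [hL, List.head?_filterMap]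
  have hlast : (List.range cs.length).reverse.findSome? (pvMatchAt cs) = L.getLast? := by
    rw [hL, ← List.head?_filterMap, List.filterMap_reverse, List.head?_reverse]
  cases hLc : L with
  | nil => rw [hLc] at hfirst; rw [hfirst]; simp
  | cons v t =>
    cases ht : t with
    | nil =>
      subst ht
      rw [hLc] at hfirst hlast
      rw [hfirst, hlast]
      have hv := hbounds v (hLc ▸ List.mem_cons_self)
      simp only [List.map_cons, List.map_nil, List.head?_cons, List.getLast?_singleton]
      rw [ofChars?_two_digits v v hv.1 hv.2 hv.1 hv.2]
      simp only [Option.getD_some]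
      ring
    | cons w r =>
      subst ht
      rw [hLc] at hfirst hlast
      rw [hfirst, hlast]
      have hv := hbounds v (hLc ▸ List.mem_cons_self)
      have hne : (w :: r) ≠ ([] : List Int) := by simp
      set u := (w :: r).getLast hne with hu
      have humem : u ∈ L := by
        rw [hLc]
        exact List.mem_cons_of_mem _ (List.getLast_mem hne)
      have hub := hbounds u humem
      have hwr : (w :: r).getLast? = some u :=
        (List.getLast_eq_iff_getLast?_eq_some hne).mp rfl
      have hlastval : (v :: w :: r).getLast? = some u := by
        rw [List.getLast?_cons_cons]; exact hwr
      have hmaplast :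
          (pvDigitChar w.toNat :: r.map (fun x => pvDigitChar x.toNat)).getLast (by simp)
            = pvDigitChar u.toNat := by
        rw [List.getLast_eq_iff_getLast?_eq_some]
        show ((w :: r).map (fun x => pvDigitChar x.toNat)).getLast? = some (pvDigitChar u.toNat)
        rw [List.getLast?_map, hwr]
        rfl
      simp only [List.map_cons, List.head?_cons]
      rw [hmaplast, hlastval]
      rw [ofChars?_two_digits v u hv.1 hv.2 hub.1 hub.2]
      simp only [Option.getD_some]
      ring
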